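-- pv_equiv track=rewrite | github.com/blazejosinski/advent-of-code | day10.py | points_per_line
-- ===== SOURCE A (Python) =====
-- PAIRS = {
--     "(": ")",
--     "{": "}",
--     "<": ">",
--     "[": "]",
-- }
--
-- POINTS = {
--     ")": 3,
--     "]": 57,
--     "}": 1197,
--     ">": 25137,
-- }
--
-- def points_per_line(line):
--     st = []
--     error = None
--     for c in line:
--         if c in PAIRS:
--             st.append(c)
--             continue
--         if not st:
--             error = c
--             break
--         if PAIRS[st[-1]] == c:
--             st.pop()
--         else:
--             error = c
--             break
--     if error:
--         return POINTS[error]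
--     return 0
-- ===== SOURCE B (Python) =====
-- PAIRS = {
--     "(": ")",
--     "{": "}",
--     "<": ">",
--     "[": "]",
-- }
--
-- POINTS = {
--     ")": 3,
--     "]": 57,
--     "}": 1197,
--     ">": 25137,
-- }
--
-- def _reduce_once(s):
--     # one left-to-right pass removing every adjacent matched bracket pair
--     out = []
--     i = 0
--     while i < len(s):
--         if i + 1 < len(s) and s[i] in PAIRS and PAIRS[s[i]] == s[i + 1]:
--             i += 2
--         else:
--             out.append(s[i])
--             i += 1
--     return "".join(out)
--
-- def points_per_line(line):
--     s = line
--     while True: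
--         t = _reduce_once(s)
--         if t == s:
--             break
--         s = t
--     for c in s:
--         if c not in "([{<":
--             return POINTS[c]
--     return 0
-- ===== Notes on version B (the rewrite author's own statement) =====
-- stated objective: alternative
-- what changed: Replaces A's single-pass explicit stack scan by repeatedly deleting adjacent matched bracket pairs until a fixpoint and then scoring the first remaining non-opener character; Pre_ excludes exactly the lines on which A raises KeyError (first illegal character is a stray non-bracket), where B raises the same KeyError.
import Mathlib
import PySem

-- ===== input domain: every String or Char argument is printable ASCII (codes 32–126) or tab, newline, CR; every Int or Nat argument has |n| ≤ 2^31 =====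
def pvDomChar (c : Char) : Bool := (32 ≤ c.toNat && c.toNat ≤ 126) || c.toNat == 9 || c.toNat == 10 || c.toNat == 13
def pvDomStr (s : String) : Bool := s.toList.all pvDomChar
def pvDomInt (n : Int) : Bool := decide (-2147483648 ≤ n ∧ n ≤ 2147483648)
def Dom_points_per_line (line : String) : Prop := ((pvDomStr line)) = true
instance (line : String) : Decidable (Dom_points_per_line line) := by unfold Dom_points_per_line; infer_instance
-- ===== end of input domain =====

-- B replaces A's stack scan by repeatedly deleting adjacent matched bracket pairs until a
-- fixpoint, then scoring the first non-opener of the residue (objective: alternative).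

-- ===== PORT A =====
-- PAIRS / POINTS dicts of the module
def pvPairs : PySem.Dict Char Char := PySem.Dict.mk [('(', ')'), ('{', '}'), ('<', '>'), ('[', ']')]
def pvPoints : PySem.Dict Char Int := PySem.Dict.mk [(')', 3), (']', 57), ('}', 1197), ('>', 25137)]

-- A's for-loop; the Python stack is held head-first (append ↦ cons, st[-1] ↦ head, pop ↦ tail);
-- returns the 'error' variable at the break / end of loop
def loopA : List Char → List Char → Option Char
  | [], _ => none
  | c :: cs, st =>
    if (PySem.Dict.get? pvPairs c).isSome then loopA cs (c :: st)   -- c in PAIRS: st.append(c); continue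
    else
      match st with
      | [] => some c                                                -- if not st: error = c; break
      | t :: st' =>
        if PySem.Dict.get? pvPairs t = some c then loopA cs st'     -- PAIRS[st[-1]] == c: st.pop()
        else some c                                                 -- else: error = c; break

def points_per_line (line : String) : Int :=
  match loopA line.toList [] with
  | some e => (PySem.Dict.get? pvPoints e).getD 0   -- POINTS[error]; KeyError (stray error char) excluded by Pre_
  | none => 0

-- ===== PORT B =====
-- Source B's opener test  c in "([{<"
def pvOpener (c : Char) : Bool := c ∈ ['(', '[', '{', '<']

-- Source B _reduce_once: one left-to-right pass removing every adjacent matched pair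
def reduceOnce : List Char → List Char
  | a :: b :: t => if PySem.Dict.get? pvPairs a = some b then reduceOnce t else a :: reduceOnce (b :: t)
  | l => l

-- the two facts reduceFix's termination cites
theorem reduceOnce_length_le : ∀ l : List Char, (reduceOnce l).length ≤ l.length := by
  intro l
  induction l using reduceOnce.induct with
  | case1 a b t h ih => rw [reduceOnce, if_pos h]; simp only [List.length_cons]; omega
  | case2 a b t h ih => rw [reduceOnce, if_neg h]; simp only [List.length_cons] at ih ⊢; omega
  | case3 l h => rcases l with _ | ⟨a, _ | ⟨b, t⟩⟩ <;> first | exact le_refl _ | exact (h a b t rfl).elim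

theorem reduceOnce_eq_of_length : ∀ l : List Char, (reduceOnce l).length = l.length → reduceOnce l = l := by
  intro l
  induction l using reduceOnce.induct with
  | case1 a b t h ih =>
      intro hlen
      have := reduceOnce_length_le t
      rw [reduceOnce, if_pos h] at hlen
      simp only [List.length_cons] at hlen; omega
  | case2 a b t h ih =>
      intro hlen
      rw [reduceOnce, if_neg h] at hlen ⊢
      have hlen' : (reduceOnce (b :: t)).length = (b :: t).length := by
        simp only [List.length_cons] at hlen ⊢; omega
      rw [ih hlen']
  | case3 l h => intro _; rcases l with _ | ⟨a, _ | ⟨b, t⟩⟩ <;> first | rfl | exact (h a b t rfl).elim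

-- Source B points_per_line's while-loop: iterate _reduce_once until it stops changing
def reduceFix (l : List Char) : List Char :=
  let t := reduceOnce l
  if _h : t = l then l else reduceFix t
termination_by l.length
decreasing_by
  have h1 := reduceOnce_length_le l
  have h2 := reduceOnce_eq_of_length l
  rcases lt_or_eq_of_le h1 with hlt | heq
  · exact hlt
  · exact absurd (h2 heq) _h

-- Source B's final for-loop over the reduced string
def scanB : List Char → Int
  | [] => 0
  | c :: cs =>
    if pvOpener c then scanB cs
    else (PySem.Dict.get? pvPoints c).getD 0      -- POINTS[c]; KeyError (stray char) excluded by Pre_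

def points_per_line_alt (line : String) : Int := scanB (reduceFix line.toList)

-- ===== PRECONDITION & SPEC =====
def pvCloser (c : Char) : Bool := c ∈ [')', ']', '}', '>']

-- the character A's loop stores in 'error' (if any), as a plain left fold
def pvErrStep : Sum (List Char) Char → Char → Sum (List Char) Char
  | Sum.inr e, _ => Sum.inr e
  | Sum.inl st, c =>
    if pvOpener c then Sum.inl (c :: st)
    else match st with
      | [] => Sum.inr c
      | t :: st' => if PySem.Dict.get? pvPairs t = some c then Sum.inl st' else Sum.inr c

-- Pre_ excludes EXACTLY the lines on which A raises KeyError: those whose first illegal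
-- character is a stray non-bracket character fed into POINTS; B raises the same KeyError there.
def Pre_points_per_line (line : String) : Prop :=
  (match line.toList.foldl pvErrStep (Sum.inl []) with
   | Sum.inr e => pvCloser e
   | Sum.inl _ => true) = true
instance (line : String) : Decidable (Pre_points_per_line line) := by unfold Pre_points_per_line; infer_instance

def pvWitness_points_per_line : String := "([{<(]"

def Spec_points_per_line (line : String) (out : Int) : Prop := out = points_per_line_alt line
instance (line : String) (out : Int) : Decidable (Spec_points_per_line line out) := by unfold Spec_points_per_line; infer_instance

-- ===== CLAIM (what is proved, stated in full; the proofs are below) =====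
def Claim_equal_points_per_line : Prop := ∀ (line : String), Dom_points_per_line line → Pre_points_per_line line → Spec_points_per_line line (points_per_line line)

-- ===== LEMMAS AND PROOFS =====

-- equation lemmas for the two loops
theorem loopA_cons (c : Char) (cs st : List Char) :
    loopA (c :: cs) st =
      if (PySem.Dict.get? pvPairs c).isSome then loopA cs (c :: st)
      else
        match st with
        | [] => some c
        | t :: st' => if PySem.Dict.get? pvPairs t = some c then loopA cs st' else some c := rfl

theorem loopA_cons_opener {c : Char} (cs st : List Char) (hop : (PySem.Dict.get? pvPairs c).isSome) :
    loopA (c :: cs) st = loopA cs (c :: st) := by rw [loopA_cons, if_pos hop]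

theorem loopA_cons_nil {c : Char} (cs : List Char) (hop : ¬ (PySem.Dict.get? pvPairs c).isSome) :
    loopA (c :: cs) [] = some c := by rw [loopA_cons, if_neg hop]

theorem loopA_cons_pop {c u : Char} (cs st' : List Char) (hop : ¬ (PySem.Dict.get? pvPairs c).isSome)
    (hm : PySem.Dict.get? pvPairs u = some c) :
    loopA (c :: cs) (u :: st') = loopA cs st' := by rw [loopA_cons, if_neg hop]; exact if_pos hm

theorem loopA_cons_err {c u : Char} (cs st' : List Char) (hop : ¬ (PySem.Dict.get? pvPairs c).isSome)
    (hm : ¬ PySem.Dict.get? pvPairs u = some c) :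
    loopA (c :: cs) (u :: st') = some c := by rw [loopA_cons, if_neg hop]; exact if_neg hm

theorem scanB_cons (c : Char) (cs : List Char) :
    scanB (c :: cs) = if pvOpener c then scanB cs else (PySem.Dict.get? pvPoints c).getD 0 := rfl

-- the four key/value pairs of PAIRS, as a disjunction usable on an arbitrary char
theorem pairs_cases {a b : Char} (h : PySem.Dict.get? pvPairs a = some b) :
    (a = '(' ∧ b = ')') ∨ (a = '{' ∧ b = '}') ∨ (a = '<' ∧ b = '>') ∨ (a = '[' ∧ b = ']') := by
  simp only [pvPairs, PySem.Dict.get?_mk_cons] at h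
  split_ifs at h with h1 h2 h3 h4
  · exact Or.inl ⟨(beq_iff_eq.mp h1).symm, (Option.some_inj.mp h).symm⟩
  · exact Or.inr (Or.inl ⟨(beq_iff_eq.mp h2).symm, (Option.some_inj.mp h).symm⟩)
  · exact Or.inr (Or.inr (Or.inl ⟨(beq_iff_eq.mp h3).symm, (Option.some_inj.mp h).symm⟩))
  · exact Or.inr (Or.inr (Or.inr ⟨(beq_iff_eq.mp h4).symm, (Option.some_inj.mp h).symm⟩))
  · rw [show (PySem.Dict.mk ([] : List (Char × Char))).get? a = none from rfl] at h
    cases h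

-- membership in PAIRS coincides with Source B's opener test
theorem opener_eq_isSome (c : Char) : pvOpener c = (PySem.Dict.get? pvPairs c).isSome := by
  by_cases hmem : c ∈ ['(', '[', '{', '<']
  · simp only [List.mem_cons, List.not_mem_nil, or_false] at hmem
    rcases hmem with rfl | rfl | rfl | rfl <;> rfl
  · have h1 : pvOpener c = false := by simp [pvOpener, hmem]
    rw [h1]
    cases hg : PySem.Dict.get? pvPairs c with
    | none => rfl
    | some b =>
        exfalso
        rcases pairs_cases hg with ⟨rfl, _⟩ | ⟨rfl, _⟩ | ⟨rfl, _⟩ | ⟨rfl, _⟩ <;> exact hmem (by decide)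

-- a value of PAIRS (a closing bracket) is not a key of PAIRS
theorem closer_not_key {a b : Char} (h : PySem.Dict.get? pvPairs a = some b) :
    ¬ (PySem.Dict.get? pvPairs b).isSome := by
  rcases pairs_cases h with ⟨_, rfl⟩ | ⟨_, rfl⟩ | ⟨_, rfl⟩ | ⟨_, rfl⟩ <;> decide

-- one reduction pass does not change A's scan result, from any stack
theorem loopA_reduceOnce : ∀ l : List Char, ∀ st, loopA (reduceOnce l) st = loopA l st := by
  intro l
  induction l using reduceOnce.induct with
  | case1 a b t h ih =>
      intro st
      rw [reduceOnce, if_pos h]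
      have hop : (PySem.Dict.get? pvPairs a).isSome := by rw [h]; rfl
      rw [show loopA (a :: b :: t) st = loopA t st by
            rw [loopA_cons_opener _ _ hop, loopA_cons_pop _ _ (closer_not_key h) h]]
      exact ih st
  | case2 a b t h ih =>
      intro st
      rw [reduceOnce, if_neg h]
      by_cases hop : (PySem.Dict.get? pvPairs a).isSome
      · rw [loopA_cons_opener _ _ hop, loopA_cons_opener _ _ hop]; exact ih (a :: st)
      · cases st with
        | nil => rw [loopA_cons_nil _ hop, loopA_cons_nil _ hop]
        | cons u st' =>
          by_cases hm : PySem.Dict.get? pvPairs u = some a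
          · rw [loopA_cons_pop _ _ hop hm, loopA_cons_pop _ _ hop hm]; exact ih st'
          · rw [loopA_cons_err _ _ hop hm, loopA_cons_err _ _ hop hm]
  | case3 l h => intro st; rcases l with _ | ⟨a, _ | ⟨b, t⟩⟩ <;> first | rfl | exact (h a b t rfl).elim

-- the while-loop preserves A's scan result and ends at a fixpoint of the pass
theorem reduceFix_spec : ∀ l : List Char,
    (∀ st, loopA (reduceFix l) st = loopA l st) ∧ reduceOnce (reduceFix l) = reduceFix l := by
  intro l
  induction l using reduceFix.induct with
  | case1 l t ht =>
      rw [reduceFix]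
      rw [dif_pos (show reduceOnce l = l from ht)]
      exact ⟨fun _ => rfl, ht⟩
  | case2 l t ht ih =>
      rw [reduceFix]
      rw [dif_neg (show ¬ reduceOnce l = l from ht)]
      exact ⟨fun st => (ih.1 st).trans (loopA_reduceOnce l st), ih.2⟩

-- A's finishing step (return POINTS[error], or 0)
def finishA : Option Char → Int
  | some e => (PySem.Dict.get? pvPoints e).getD 0
  | none => 0

-- on a pass-fixpoint, A's scan from a stack whose head cannot match the first char
-- computes exactly Source B's final for-loop
theorem nf_scan : ∀ l : List Char, reduceOnce l = l → ∀ st : List Char,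
    (∀ u t b cs, st = u :: t → l = b :: cs → ¬ PySem.Dict.get? pvPairs u = some b) →
    finishA (loopA l st) = scanB l := by
  intro l
  induction l with
  | nil => intro _ st _; rfl
  | cons c cs ih =>
      intro hnf st hcompat
      have hstep : reduceOnce cs = cs ∧ (∀ b t, cs = b :: t → ¬ PySem.Dict.get? pvPairs c = some b) := by
        cases cs with
        | nil => exact ⟨rfl, fun b t hbt => absurd hbt (by simp)⟩
        | cons b t =>
          by_cases hp : PySem.Dict.get? pvPairs c = some b
          · exfalso
            rw [reduceOnce, if_pos hp] at hnf
            have h1 := reduceOnce_length_le t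
            have h2 := congrArg List.length hnf
            simp only [List.length_cons] at h2; omega
          · rw [reduceOnce, if_neg hp] at hnf
            have h2 : reduceOnce (b :: t) = b :: t := by injection hnf
            refine ⟨h2, ?_⟩
            intro b' t' hbt
            cases hbt
            exact hp
      by_cases hop : (PySem.Dict.get? pvPairs c).isSome
      · rw [loopA_cons_opener _ _ hop]
        rw [scanB_cons, if_pos (by rw [opener_eq_isSome]; exact hop)]
        refine ih hstep.1 (c :: st) ?_
        intro u t b' cs' h1 h2
        cases h1
        exact hstep.2 b' cs' h2
      · rw [scanB_cons, if_neg (by rw [opener_eq_isSome]; exact hop)]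
        cases st with
        | nil => rw [loopA_cons_nil _ hop]; rfl
        | cons u st' =>
          rw [loopA_cons_err _ _ hop (hcompat u st' c cs rfl rfl)]; rfl

-- ===== VERDICT (by name: the statement is the Claim_ definition above) =====
theorem points_per_line_spec : Claim_equal_points_per_line := by
  intro line _ _
  unfold Spec_points_per_line points_per_line points_per_line_alt
  have h1 := (reduceFix_spec line.toList).1 []
  have h2 := (reduceFix_spec line.toList).2
  have h3 := nf_scan (reduceFix line.toList) h2 [] (fun u t b cs h1' _ => by cases h1')
  rw [h1] at h3
  rw [← h3]
  rfl
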